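-- pv_equiv track=rewrite | github.com/RavinderSinghPB/data-structure-and-algorithm | priority que/Min sum formed by digits.py | minDigitSum
-- ===== SOURCE A (Python) =====
-- import heapq as hq
--
-- def minDigitSum(arr, n):
--     hq.heapify(arr)
--
--     n1 = 0
--     n2 = 0
--
--     i=1
--     while arr:
--
--         if i%2==0:
--             n1= n1*10 + hq.heappop(arr)
--         else:
--             n2 = n2*10 +hq.heappop(arr)
--
--         i+=1
--
--     return n1+n2
-- ===== SOURCE B (Python) =====
-- def minDigitSum(arr, n):
--     s = sorted(arr)
--     w = []                      # w[k] = 10**(k//2): weight of the k-th digit from the end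
--     p = 1
--     for k in range(len(s)):
--         w.append(p)
--         if k % 2 == 1:
--             p *= 10
--     return sum(d * q for d, q in zip(s, reversed(w)))
-- ===== Notes on version B (the rewrite author's own statement) =====
-- stated objective: alternative
-- what changed: Replaced the heap-draining loop with alternating accumulators by a closed-form weighted sum: sort ascending once, then each digit at index j contributes d * 10**((m-1-j)//2); no heap, no parity counter, no accumulators being multiplied along the way. Side effect differs: A drains arr (leaves it empty), B does not mutate arr; the equivalence is about the return value.
import Mathlib
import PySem

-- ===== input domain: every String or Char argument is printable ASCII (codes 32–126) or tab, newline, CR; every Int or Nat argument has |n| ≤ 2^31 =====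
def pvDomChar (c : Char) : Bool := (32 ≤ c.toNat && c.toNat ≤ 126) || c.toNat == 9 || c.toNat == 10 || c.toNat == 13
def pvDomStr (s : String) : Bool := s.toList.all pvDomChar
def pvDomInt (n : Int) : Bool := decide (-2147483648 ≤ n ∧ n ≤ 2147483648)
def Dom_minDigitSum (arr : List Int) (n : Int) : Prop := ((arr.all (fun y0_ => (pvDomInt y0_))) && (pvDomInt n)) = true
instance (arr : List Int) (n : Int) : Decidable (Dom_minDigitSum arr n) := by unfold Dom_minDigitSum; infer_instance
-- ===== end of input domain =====

-- B replaces A's heap-draining alternating loop by a closed-form weighted sum over the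
-- ascending sort (digit at index j weighs 10^((m-1-j)//2)). Side effects differ: A drains
-- arr (leaves it empty), B does not mutate it; the equivalence is about the RETURN value only.

-- ===== PORT A =====
-- A's heap: heapify(arr) then heappop until empty; heappop is a library call, ported by its
-- contract: it removes and returns the minimum element of the current contents.
def minDigitSumLoopA : List Int → Int → Int → Int → Int
  | [], n1, n2, _ => n1 + n2
  | x :: t, n1, n2, i =>
    let m := (PySem.List.min? (x :: t) (fun y => y)).getD 0   -- hq.heappop(arr): the minimum
    let rest := (x :: t).erase m                              -- …removed from the heap
    if i % 2 == 0 then minDigitSumLoopA rest (n1 * 10 + m) n2 (i + 1)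
    else minDigitSumLoopA rest n1 (n2 * 10 + m) (i + 1)
termination_by l => l.length
decreasing_by
  all_goals
    have hmin := PySem.List.min?_id_cons x t
    have hm : (PySem.List.min? (x :: t) (fun y => y)).getD 0 ∈ x :: t := by
      simpa [hmin] using PySem.List.min?_mem hmin
    have h2 := List.length_erase_of_mem hm
    simp at h2 ⊢
    omega

def minDigitSum (arr : List Int) (n : Int) : Int :=
  minDigitSumLoopA arr 0 0 1

-- ===== PORT B =====
-- s = sorted(arr); build w (w[k] = the k-th power weight, doubling every second step);
-- return sum(d * q for d, q in zip(s, reversed(w)))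
def minDigitSum_alt (arr : List Int) (n : Int) : Int :=
  let s := PySem.List.sorted arr (fun y => y) false
  let wp := (PySem.List.pyRange 0 (s.length : Int) 1).foldl
      (fun (st : List Int × Int) k =>
        (st.1 ++ [st.2], if PySem.Int.mod k 2 == 1 then st.2 * 10 else st.2)) ([], 1)
  ((s.zip wp.1.reverse).map (fun p => p.1 * p.2)).sum

-- ===== PRECONDITION & SPEC =====
def Spec_minDigitSum (arr : List Int) (n : Int) (out : Int) : Prop := out = minDigitSum_alt arr n
instance (arr : List Int) (n : Int) (out : Int) : Decidable (Spec_minDigitSum arr n out) := by unfold Spec_minDigitSum; infer_instance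

-- ===== CLAIM (what is proved, stated in full; the proofs are below) =====
def Claim_equal_minDigitSum : Prop := ∀ (arr : List Int) (n : Int), Dom_minDigitSum arr n → Spec_minDigitSum arr n (minDigitSum arr n)

-- ===== LEMMAS AND PROOFS =====

-- Reference loop: consume the list FRONT to back, alternating (A's loop over the ascending sort).
def ascLoop : List Int → Int → Int → Int → Int
  | [], n1, n2, _ => n1 + n2
  | d :: t, n1, n2, i =>
    if i % 2 == 0 then ascLoop t (n1 * 10 + d) n2 (i + 1)
    else ascLoop t n1 (n2 * 10 + d) (i + 1)

-- The weighted sum, recursively: head of a list of length |t|+1 weighs 10^(|t|/2).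
def wsum : List Int → Int
  | [] => 0
  | d :: t => d * 10 ^ (t.length / 2) + wsum t

-- head/tail of the ascending sort: min in front, sort of the rest behind.
theorem sorted_cons_min (l : List Int) (m : Int) (hm : m ∈ l) (hmin : ∀ y ∈ l, m ≤ y) :
    PySem.List.sorted l (fun y => y) false = m :: PySem.List.sorted (l.erase m) (fun y => y) false := by
  refine List.Perm.eq_of_pairwise (fun a b _ _ hab hba => le_antisymm hab hba)
      (PySem.List.sorted_pairwise l (fun y => y)) ?_ ?_
  · refine List.Pairwise.cons ?_ (PySem.List.sorted_pairwise (l.erase m) (fun y => y))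
    intro y hy
    exact hmin y (List.mem_of_mem_erase ((PySem.List.mem_sorted _ _ _ _).1 hy))
  · exact (PySem.List.sorted_perm l (fun y => y) false).trans
      ((List.perm_cons_erase hm).trans
        (List.Perm.cons m (PySem.List.sorted_perm (l.erase m) (fun y => y) false).symm))

-- A's heap-draining loop is the front-to-back loop over the ascending sort.
theorem loopA_eq_ascLoop (k : Nat) : ∀ l : List Int, l.length ≤ k → ∀ n1 n2 i,
    minDigitSumLoopA l n1 n2 i = ascLoop (PySem.List.sorted l (fun y => y) false) n1 n2 i := by
  induction k with
  | zero =>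
    intro l hl n1 n2 i
    have : l = [] := List.length_eq_zero_iff.mp (Nat.le_zero.mp hl)
    subst this
    rw [minDigitSumLoopA]
    rfl
  | succ k ih =>
    intro l hl n1 n2 i
    match l with
    | [] => rw [minDigitSumLoopA]; rfl
    | x :: t =>
      have hmin : PySem.List.min? (x :: t) (fun y => y) = some (t.foldl min x) :=
        PySem.List.min?_id_cons x t
      set m := (PySem.List.min? (x :: t) (fun y => y)).getD 0 with hmdef
      have hms : PySem.List.min? (x :: t) (fun y => y) = some m := by simp [hmdef, hmin]
      have hmem : m ∈ x :: t := PySem.List.min?_mem hms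
      have hle : ∀ y ∈ x :: t, m ≤ y := fun y hy => PySem.List.min?_isMin hms y hy
      have hsort := sorted_cons_min (x :: t) m hmem hle
      have hlen : ((x :: t).erase m).length ≤ k := by
        have h2 := List.length_erase_of_mem hmem
        have h3 : (x :: t).length = t.length + 1 := by simp
        simp at hl
        omega
      rw [minDigitSumLoopA, hsort]
      simp only [ascLoop]
      split_ifs <;> exact ih _ hlen _ _ _

-- Closed form of the alternating loop: the accumulator that still gets ⌈|l|/2⌉ (resp. ⌊|l|/2⌋)
-- digits is scaled by that power of ten, and the digits contribute the weighted sum.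
theorem ascLoop_closed (l : List Int) : ∀ n1 n2 (i : Int),
    ascLoop l n1 n2 i =
      (if i % 2 == 0 then n1 * 10 ^ ((l.length + 1) / 2) + n2 * 10 ^ (l.length / 2)
       else n1 * 10 ^ (l.length / 2) + n2 * 10 ^ ((l.length + 1) / 2)) + wsum l := by
  induction l with
  | nil =>
    intro n1 n2 i
    simp only [ascLoop, wsum, List.length_nil]
    split_ifs <;> ring
  | cons d t ih =>
    intro n1 n2 i
    simp only [ascLoop, wsum, List.length_cons]
    have e1 : (t.length + 1 + 1) / 2 = t.length / 2 + 1 := by omega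
    by_cases h : i % 2 = 0
    · rw [if_pos (show ((i % 2 == 0) = true) by simpa using h),
          if_pos (show ((i % 2 == 0) = true) by simpa using h),
          ih (n1 * 10 + d) n2 (i + 1),
          if_neg (show ¬ (((i + 1) % 2 == 0) = true) by simp; omega), e1]
      ring
    · rw [if_neg (show ¬ ((i % 2 == 0) = true) by simpa using h),
          if_neg (show ¬ ((i % 2 == 0) = true) by simpa using h),
          ih n1 (n2 * 10 + d) (i + 1),
          if_pos (show (((i + 1) % 2 == 0) = true) by simp; omega), e1]
      ring

-- B's weight-building loop yields exactly the powers 10^(k/2), with 10^(m/2) pending.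
theorem weights_spec (m : Nat) :
    (PySem.List.pyRange 0 (m : Int) 1).foldl
      (fun (st : List Int × Int) k =>
        (st.1 ++ [st.2], if PySem.Int.mod k 2 == 1 then st.2 * 10 else st.2)) ([], 1)
    = ((List.range m).map (fun k => (10 : Int) ^ (k / 2)), (10 : Int) ^ (m / 2)) := by
  induction m with
  | zero => simp [PySem.List.pyRange_zero_nat]
  | succ m ih =>
    have hsplit : PySem.List.pyRange 0 ((m + 1 : Nat) : Int) 1
        = PySem.List.pyRange 0 (m : Int) 1 ++ [(m : Int)] := by
      have h0 : (0 : Int) ≤ (m : Int) := by exact_mod_cast Nat.zero_le m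
      have := PySem.List.pyRange_one_succ_right (a := 0) (b := (m : Int)) h0
      rw [← this]; norm_num
    rw [hsplit, List.foldl_append, ih]
    simp only [List.foldl_cons, List.foldl_nil]
    have hmod : PySem.Int.mod (m : Int) 2 = ((m % 2 : Nat) : Int) :=
      PySem.Int.mod_natCast m 2
    rcases Nat.even_or_odd m with he | ho
    · have h2 : m % 2 = 0 := Nat.even_iff.mp he
      have hc : (PySem.Int.mod (m : Int) 2 == 1) = false := by rw [hmod, h2]; decide
      simp only [hc, List.range_succ, List.map_append, List.map_cons, List.map_nil]
      have he2 : (m + 1) / 2 = m / 2 := by omega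
      rw [he2]
      simp
    · have h2 : m % 2 = 1 := Nat.odd_iff.mp ho
      have hc : (PySem.Int.mod (m : Int) 2 == 1) = true := by rw [hmod, h2]; decide
      simp only [hc, List.range_succ, List.map_append, List.map_cons, List.map_nil]
      have h3 : (m + 1) / 2 = m / 2 + 1 := by omega
      rw [h3, pow_succ]
      simp

-- zipping a list with the reversed weights and summing the products is wsum.
theorem zip_weights_wsum (s : List Int) :
    ((s.zip (((List.range s.length).map (fun k => (10 : Int) ^ (k / 2))).reverse)).map
      (fun p => p.1 * p.2)).sum = wsum s := by
  induction s with
  | nil => simp [wsum]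
  | cons d t ih =>
    have hrev : ((List.range (d :: t).length).map (fun k => (10 : Int) ^ (k / 2))).reverse
        = (10 : Int) ^ (t.length / 2)
          :: ((List.range t.length).map (fun k => (10 : Int) ^ (k / 2))).reverse := by
      simp [List.range_succ]
    rw [hrev]
    simp only [List.zip_cons_cons, List.map_cons, List.sum_cons, wsum, ih]

-- ===== VERDICT (by name: the statement is the Claim_ definition above) =====
theorem minDigitSum_spec : Claim_equal_minDigitSum := by
  intro arr n _
  unfold Spec_minDigitSum minDigitSum
  simp only [minDigitSum_alt]
  rw [loopA_eq_ascLoop arr.length arr (le_refl _) 0 0 1, ascLoop_closed,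
      weights_spec, zip_weights_wsum]
  simp only [show (((1 : Int) % 2 == 0) = false) from rfl]
  simp
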